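-- pv_equiv track=rewrite | github.com/Unobtainiumrock/jobhunt | pipeline/classify_leads.py | _build_full_messages_text
-- ===== SOURCE A (Python) =====
-- from typing import Any, Literal
--
-- def _build_full_messages_text(convo: dict[str, Any], max_chars: int = 80_000) -> str:
--     """Format full message thread for Stage 2."""
--     lines: list[str] = []
--     total = 0
--     for m in convo.get("messages", []):
--         ts = m.get("timestamp", "")[:16]
--         sender = m.get("sender", "Unknown")
--         text = m.get("text", "")
--         subject = m.get("subject", "")
--         line = f"[{ts}] {sender}: {text}"
--         if subject:
--             line = f"[{ts}] {sender} (subject: {subject}): {text}"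
--         if total + len(line) > max_chars:
--             lines.append("... (truncated)")
--             break
--         lines.append(line)
--         total += len(line)
--     return "\n".join(lines)
-- ===== SOURCE B (Python) =====
-- def _format_line(m):
--     ts = m.get("timestamp", "")[:16]
--     sender = m.get("sender", "Unknown")
--     text = m.get("text", "")
--     subject = m.get("subject", "")
--     if subject:
--         return f"[{ts}] {sender} (subject: {subject}): {text}"
--     return f"[{ts}] {sender}: {text}"
--
--
-- def _build_full_messages_text(convo, max_chars=80_000):
--     """Format full message thread for Stage 2 (build-then-cut decomposition)."""
--     lines = [_format_line(m) for m in convo.get("messages", [])]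
--     # inclusive prefix sums of the line lengths
--     sums = []
--     running = 0
--     for line in lines:
--         running += len(line)
--         sums.append(running)
--     # first index whose inclusive running total exceeds the budget
--     for i, s in enumerate(sums):
--         if s > max_chars:
--             return "\n".join(lines[:i] + ["... (truncated)"])
--     return "\n".join(lines)
-- ===== Notes on version B (the rewrite author's own statement) =====
-- stated objective: alternative
-- what changed: A interleaves formatting, the running character total and the truncation break in one loop; B is a two-phase pass: format every line first, compute the inclusive prefix sums of the line lengths, then find the first index whose running sum exceeds max_chars and slice-and-join (appending the marker only if a cutoff exists).
import Mathlib
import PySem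

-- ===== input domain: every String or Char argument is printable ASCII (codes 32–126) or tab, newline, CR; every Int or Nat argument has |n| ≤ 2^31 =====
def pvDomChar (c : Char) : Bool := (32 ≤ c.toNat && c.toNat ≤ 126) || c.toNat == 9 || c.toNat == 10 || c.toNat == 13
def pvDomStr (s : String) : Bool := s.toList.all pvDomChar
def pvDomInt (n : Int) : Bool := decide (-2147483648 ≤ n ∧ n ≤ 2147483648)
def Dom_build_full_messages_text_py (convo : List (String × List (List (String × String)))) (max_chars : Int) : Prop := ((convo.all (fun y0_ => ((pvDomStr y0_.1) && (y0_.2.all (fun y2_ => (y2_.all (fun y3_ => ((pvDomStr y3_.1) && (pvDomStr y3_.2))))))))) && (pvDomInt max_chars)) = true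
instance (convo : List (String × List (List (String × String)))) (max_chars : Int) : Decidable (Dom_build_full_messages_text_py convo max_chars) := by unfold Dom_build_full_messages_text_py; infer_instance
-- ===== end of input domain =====

-- B rebuilds the thread text in two phases (format all lines, prefix-sum lengths, find the cutoff, slice and join)
-- instead of A's single loop with a running total and an early break; alternative decomposition, same cost.


-- ===== PORT A =====
def build_full_messages_text_py_go (max_chars : Int) : List (List (String × String)) → Int → List String → List String
  | [], _, lines => lines
  | m :: ms, total, lines =>
    let d := PySem.Dict.mk m
    let ts := PySem.Str.slice (d.getD "timestamp" "") none (some 16)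
    let sender := d.getD "sender" "Unknown"
    let text := d.getD "text" ""
    let subject := d.getD "subject" ""
    let line0 := "[" ++ ts ++ "] " ++ sender ++ ": " ++ text
    let line := if subject ≠ "" then "[" ++ ts ++ "] " ++ sender ++ " (subject: " ++ subject ++ "): " ++ text else line0
    if total + PySem.Str.len line > max_chars then lines ++ ["... (truncated)"]
    else build_full_messages_text_py_go max_chars ms (total + PySem.Str.len line) (lines ++ [line])

def build_full_messages_text_py (convo : List (String × List (List (String × String)))) (max_chars : Int) : String :=
  PySem.Str.join "\n" (build_full_messages_text_py_go max_chars ((PySem.Dict.mk convo).getD "messages" []) 0 [])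

-- ===== PORT B =====
def pvFmtLine (m : List (String × String)) : String :=
  let d := PySem.Dict.mk m
  let ts := PySem.Str.slice (d.getD "timestamp" "") none (some 16)
  let sender := d.getD "sender" "Unknown"
  let text := d.getD "text" ""
  let subject := d.getD "subject" ""
  if subject ≠ "" then "[" ++ ts ++ "] " ++ sender ++ " (subject: " ++ subject ++ "): " ++ text
  else "[" ++ ts ++ "] " ++ sender ++ ": " ++ text

-- the second 'for' loop of B: early return on the first running sum over budget
def pvFindTrunc (lines : List String) (max_chars : Int) : List (Int × Int) → Option String
  | [] => none
  | (i, s) :: rest =>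
    if s > max_chars then
      some (PySem.Str.join "\n" (PySem.List.slice lines none (some i) ++ ["... (truncated)"]))
    else pvFindTrunc lines max_chars rest

def build_full_messages_text_py_alt (convo : List (String × List (List (String × String)))) (max_chars : Int) : String :=
  let lines := ((PySem.Dict.mk convo).getD "messages" []).map pvFmtLine
  let sums := (lines.foldl
      (fun (p : Int × List Int) line => (p.1 + PySem.Str.len line, p.2 ++ [p.1 + PySem.Str.len line]))
      (0, [])).2
  match pvFindTrunc lines max_chars (PySem.List.enumerate sums 0) with
  | some r => r
  | none => PySem.Str.join "\n" lines

-- ===== PRECONDITION & SPEC =====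
def Spec_build_full_messages_text_py (convo : List (String × List (List (String × String)))) (max_chars : Int) (out : String) : Prop := out = build_full_messages_text_py_alt convo max_chars
instance (convo : List (String × List (List (String × String)))) (max_chars : Int) (out : String) : Decidable (Spec_build_full_messages_text_py convo max_chars out) := by unfold Spec_build_full_messages_text_py; infer_instance

-- ===== CLAIM (what is proved, stated in full; the proofs are below) =====
def Claim_equal_build_full_messages_text_py : Prop := ∀ (convo : List (String × List (List (String × String)))) (max_chars : Int), Dom_build_full_messages_text_py convo max_chars → Spec_build_full_messages_text_py convo max_chars (build_full_messages_text_py convo max_chars)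

-- ===== LEMMAS AND PROOFS =====

-- inclusive prefix sums of the line lengths, starting from total t
def pvPrefixFrom (t : Int) : List String → List Int
  | [] => []
  | l :: ls => (t + PySem.Str.len l) :: pvPrefixFrom (t + PySem.Str.len l) ls

-- index of the first line whose inclusive running length exceeds the budget b
def pvCut? (b : Int) : List String → Option Nat
  | [] => none
  | l :: ls => if PySem.Str.len l > b then some 0 else (pvCut? (b - PySem.Str.len l) ls).map Nat.succ

theorem pv_go_eq_cut (max_chars : Int) :
    ∀ (ms : List (List (String × String))) (total : Int) (lines : List String),
      build_full_messages_text_py_go max_chars ms total lines =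
        match pvCut? (max_chars - total) (ms.map pvFmtLine) with
        | some i => lines ++ (ms.map pvFmtLine).take i ++ ["... (truncated)"]
        | none => lines ++ ms.map pvFmtLine := by
  intro ms
  induction ms with
  | nil => intro total lines; simp [build_full_messages_text_py_go, pvCut?]
  | cons m ms ih =>
    intro total lines
    simp only [build_full_messages_text_py_go, List.map_cons, pvCut?]
    have hline : (if (PySem.Dict.mk m).getD "subject" "" ≠ "" then
        "[" ++ PySem.Str.slice ((PySem.Dict.mk m).getD "timestamp" "") none (some 16) ++ "] " ++
          (PySem.Dict.mk m).getD "sender" "Unknown" ++ " (subject: " ++ (PySem.Dict.mk m).getD "subject" "" ++ "): " ++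
          (PySem.Dict.mk m).getD "text" ""
      else "[" ++ PySem.Str.slice ((PySem.Dict.mk m).getD "timestamp" "") none (some 16) ++ "] " ++
          (PySem.Dict.mk m).getD "sender" "Unknown" ++ ": " ++ (PySem.Dict.mk m).getD "text" "") = pvFmtLine m := rfl
    rw [hline]
    split_ifs with h1 h2 h2
    · simp
    · omega
    · omega
    · rw [ih (total + PySem.Str.len (pvFmtLine m)) (lines ++ [pvFmtLine m])]
      have hb : max_chars - (total + PySem.Str.len (pvFmtLine m)) =
          max_chars - total - PySem.Str.len (pvFmtLine m) := by ring
      rw [hb]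
      cases pvCut? (max_chars - total - PySem.Str.len (pvFmtLine m)) (ms.map pvFmtLine) with
      | none => simp
      | some i => simp [List.take_succ_cons]

theorem pv_foldl_sums :
    ∀ (ls : List String) (t : Int) (acc : List Int),
      (ls.foldl (fun (p : Int × List Int) line => (p.1 + PySem.Str.len line, p.2 ++ [p.1 + PySem.Str.len line])) (t, acc)).2 =
        acc ++ pvPrefixFrom t ls := by
  intro ls
  induction ls with
  | nil => intro t acc; simp [pvPrefixFrom]
  | cons l ls ih =>
    intro t acc
    simp only [List.foldl_cons]
    rw [ih (t + PySem.Str.len l) (acc ++ [t + PySem.Str.len l])]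
    simp [pvPrefixFrom]

theorem pv_findTrunc_eq_cut (full : List String) (max_chars : Int) :
    ∀ (suffix : List String) (t k : Int),
      pvFindTrunc full max_chars (PySem.List.enumerate (pvPrefixFrom t suffix) k) =
        (pvCut? (max_chars - t) suffix).map
          (fun (i : Nat) => PySem.Str.join "\n" (PySem.List.slice full none (some (k + (i : Int))) ++ ["... (truncated)"])) := by
  intro suffix
  induction suffix with
  | nil => intro t k; simp [pvPrefixFrom, pvCut?, pvFindTrunc]
  | cons l ls ih =>
    intro t k
    have henum : PySem.List.enumerate (pvPrefixFrom t (l :: ls)) k =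
        (k, t + PySem.Str.len l) :: PySem.List.enumerate (pvPrefixFrom (t + PySem.Str.len l) ls) (k + 1) := by
      simp [pvPrefixFrom]
    rw [henum]
    simp only [pvFindTrunc, pvCut?]
    split_ifs with h1 h2 h2
    · simp
    · omega
    · omega
    · rw [ih (t + PySem.Str.len l) (k + 1)]
      have hb : max_chars - (t + PySem.Str.len l) = max_chars - t - PySem.Str.len l := by ring
      rw [hb, Option.map_map]
      refine congrFun (congrArg Option.map ?_) _
      funext i
      simp only [Function.comp]
      have hk : k + ((Nat.succ i : Nat) : Int) = k + 1 + (i : Int) := by push_cast; ring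
      rw [hk]

-- ===== VERDICT (by name: the statement is the Claim_ definition above) =====
theorem build_full_messages_text_py_spec : Claim_equal_build_full_messages_text_py := by
  intro convo max_chars _
  show build_full_messages_text_py convo max_chars = build_full_messages_text_py_alt convo max_chars
  unfold build_full_messages_text_py build_full_messages_text_py_alt
  simp only [pv_go_eq_cut, pv_foldl_sums, List.nil_append]
  rw [pv_findTrunc_eq_cut]
  have h0 : max_chars - 0 = max_chars := by ring
  rw [h0]
  cases pvCut? max_chars (((PySem.Dict.mk convo).getD "messages" []).map pvFmtLine) with
  | none => rfl
  | some i =>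
    simp only [Option.map_some]
    have hz : (0 : Int) + (i : Int) = ((i : Nat) : Int) := by ring
    rw [hz, PySem.List.slice_to_natCast]
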